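-- pv_equiv track=rewrite | github.com/pumpsulp/theoryOfCoding | LaboratoryWork5.py | get_vectors_order
-- ===== SOURCE A (Python) =====
-- from itertools import combinations
--
-- def get_vectors_order(r: int, m: int) -> list[list[int]]:
--     """
--     Генерация порядка векторов для кода Рида-Маллера.
--
--     :param r: Параметр кода Рида-Маллера.
--     :param m: Количество битов в кодовом слове.
--     :return: Список векторов, представляющих комбинации индексов.
--     """
--     elements = list(range(m))
--     ans = []
--     for i in range(r + 1):
--         combinations_list = sorted(list(combinations(elements, i)), reverse=True)
--         for combination in combinations_list:
--             ans.append(list(combination))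
--     return ans
-- ===== SOURCE B (Python) =====
-- def get_vectors_order(r: int, m: int) -> list[list[int]]:
--     """Reed-Muller vector order: sizes 0..r, each size listed in
--     reverse-lexicographic order, generated directly by descending-first
--     recursion instead of itertools.combinations + sort."""
--     def rev(lo: int, k: int) -> list[list[int]]:
--         if k == 0:
--             return [[]]
--         out = []
--         for j in range(m - k, lo - 1, -1):
--             for rest in rev(j + 1, k - 1):
--                 out.append([j] + rest)
--         return out
--
--     ans = []
--     for k in range(r + 1):
--         ans.extend(rev(0, k))
--     return ans
-- ===== Notes on version B (the rewrite author's own statement) =====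
-- stated objective: alternative
-- what changed: Replaces per-size itertools.combinations followed by a reverse sort with a direct descending-first recursion that emits each size's combinations already in reverse-lexicographic order, so no sorting happens at all.
import Mathlib
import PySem

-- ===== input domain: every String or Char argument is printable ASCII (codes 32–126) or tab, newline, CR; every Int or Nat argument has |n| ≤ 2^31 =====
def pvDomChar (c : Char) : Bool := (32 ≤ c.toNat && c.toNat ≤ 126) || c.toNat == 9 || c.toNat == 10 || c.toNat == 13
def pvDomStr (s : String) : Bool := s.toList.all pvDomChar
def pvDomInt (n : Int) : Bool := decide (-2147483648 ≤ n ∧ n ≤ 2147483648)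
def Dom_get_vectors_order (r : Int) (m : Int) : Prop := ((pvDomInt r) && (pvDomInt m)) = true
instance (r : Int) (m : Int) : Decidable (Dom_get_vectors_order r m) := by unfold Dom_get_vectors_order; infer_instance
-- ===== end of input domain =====

-- B replaces per-size itertools.combinations + reverse sort by a direct descending-first
-- recursion that emits each size's combinations already in reverse-lexicographic order (alternative decomposition).


-- ===== PORT A =====
def get_vectors_order (r : Int) (m : Int) : List (List Int) :=
  let elements := PySem.List.pyRange 0 m 1
  (PySem.List.pyRange 0 (r + 1) 1).foldl (fun ans i =>
    let combinations_list :=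
      PySem.List.sorted (PySem.List.combinations elements i.toNat) (fun x => x) true
    combinations_list.foldl (fun ans combination => ans ++ [combination]) ans) []

-- ===== PORT B =====
-- helper rev(lo, k) of Source B: combinations of {lo..m-1} of size k, largest-first recursion
def pvRev (m : Int) (lo : Int) : Nat → List (List Int)
  | 0 => [[]]
  | k + 1 =>
    (PySem.List.pyRange (m - ((k : Int) + 1)) (lo - 1) (-1)).foldl (fun out j =>
      (pvRev m (j + 1) k).foldl (fun out rest => out ++ [j :: rest]) out) []

def get_vectors_order_alt (r : Int) (m : Int) : List (List Int) :=
  (PySem.List.pyRange 0 (r + 1) 1).foldl (fun ans k => ans ++ pvRev m 0 k.toNat) []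

-- ===== PRECONDITION & SPEC =====
def Spec_get_vectors_order (r : Int) (m : Int) (out : List (List Int)) : Prop := out = get_vectors_order_alt r m
instance (r : Int) (m : Int) (out : List (List Int)) : Decidable (Spec_get_vectors_order r m out) := by unfold Spec_get_vectors_order; infer_instance

-- ===== CLAIM (what is proved, stated in full; the proofs are below) =====
def Claim_equal_get_vectors_order : Prop := ∀ (r : Int) (m : Int), Dom_get_vectors_order r m → Spec_get_vectors_order r m (get_vectors_order r m)

-- ===== LEMMAS AND PROOFS =====

-- combinations of a strictly increasing list are strictly increasing in lex order
theorem pv_combs_pairwise (xs : List Int) (k : Nat) (h : xs.Pairwise (· < ·)) :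
    (PySem.List.combinations xs k).Pairwise (· < ·) := by
  induction xs generalizing k with
  | nil =>
    cases k with
    | zero => simp [PySem.List.combinations_zero]
    | succ k => simp [PySem.List.combinations_nil_succ]
  | cons x xs ih =>
    cases k with
    | zero => simp [PySem.List.combinations_zero]
    | succ k =>
      rw [PySem.List.combinations_cons_succ]
      rcases List.pairwise_cons.mp h with ⟨hx, hxs⟩
      refine List.pairwise_append.mpr ⟨?_, ih (k+1) hxs, ?_⟩
      · rw [List.pairwise_map]
        refine (ih k hxs).imp ?_
        intro a b hab
        exact List.lex_cons_iff.mpr hab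
      · intro a ha b hb
        rcases List.mem_map.mp ha with ⟨a', _, rfl⟩
        have hsub := PySem.List.sublist_of_mem_combinations hb
        have hlen := PySem.List.length_of_mem_combinations hb
        cases b with
        | nil => simp at hlen
        | cons y b' =>
          have hy : y ∈ xs := hsub.mem (List.mem_cons_self)
          exact List.Lex.rel (hx y hy)

-- A's per-size block: reverse sort of a strictly increasing list is its reverse
theorem pv_sorted_rev (xs : List Int) (h : xs.Pairwise (· < ·)) (k : Nat) :
    PySem.List.sorted (PySem.List.combinations xs k) (fun x => x) true
      = (PySem.List.combinations xs k).reverse := by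
  have hd : (fun (a b : List Int) => a.decidableLT b)
      = (LinearOrder.toDecidableLT : DecidableRel (fun (a b : List Int) => a < b)) :=
    funext fun a => funext fun b => Subsingleton.elim _ _
  rw [hd]
  exact PySem.List.sorted_rev_eq_of_perm_of_pairwise_gt _ _ _
    (PySem.List.combinations xs k).reverse_perm
    (List.pairwise_reverse.mpr (pv_combs_pairwise xs k h))

-- combinations of a range, unrolled over the choice of first element
theorem pv_combs_range (m : Int) (k : Nat) : ∀ (n : Nat) (lo : Int), m - lo ≤ (n : Int) →
    PySem.List.combinations (PySem.List.pyRange lo m 1) (k + 1)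
      = (PySem.List.pyRange lo (m - (k : Int)) 1).flatMap
          (fun j => (PySem.List.combinations (PySem.List.pyRange (j + 1) m 1) k).map (j :: ·)) := by
  intro n
  induction n with
  | zero =>
    intro lo hlo
    rw [PySem.List.pyRange_one_eq_nil (by omega : m - (k : Int) ≤ lo),
        PySem.List.pyRange_one_eq_nil (by omega : m ≤ lo)]
    simp [PySem.List.combinations_nil_succ]
  | succ n ih =>
    intro lo hlo
    by_cases hk : lo < m - (k : Int)
    · have hm : lo < m := by omega
      rw [PySem.List.pyRange_one_cons hm, PySem.List.combinations_cons_succ,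
          PySem.List.pyRange_one_cons hk, List.flatMap_cons, ih (lo + 1) (by omega)]
    · have hk' : m - (k : Int) ≤ lo := by omega
      rw [PySem.List.pyRange_one_eq_nil hk', List.flatMap_nil]
      apply PySem.List.combinations_eq_nil_of_length_lt
      rw [PySem.List.length_pyRange_one]
      omega

-- B's recursion produces exactly the reverse of the combinations list
theorem pv_rev_eq (m : Int) (k : Nat) : ∀ (lo : Int),
    pvRev m lo k = (PySem.List.combinations (PySem.List.pyRange lo m 1) k).reverse := by
  induction k with
  | zero => intro lo; simp [pvRev, PySem.List.combinations_zero]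
  | succ k ih =>
    intro lo
    rw [pvRev, PySem.List.pyRange_neg_one_eq_reverse,
        (by ring : lo - 1 + 1 = lo), (by ring : m - ((k : Int) + 1) + 1 = m - (k : Int)),
        PySem.List.foldl_congr_mem _ _
          (fun out j => out ++ ((PySem.List.combinations (PySem.List.pyRange (j + 1) m 1) k).map (j :: ·)).reverse) []
          (by
            intro out j _
            rw [PySem.List.foldl_append_singleton_eq_map, ih (j + 1), List.map_reverse]),
        PySem.List.foldl_append_eq_flatMap, List.nil_append,
        pv_combs_range m k (m - lo).toNat lo (by omega), List.reverse_flatMap]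
    rfl

-- ===== VERDICT (by name: the statement is the Claim_ definition above) =====
theorem get_vectors_order_spec : Claim_equal_get_vectors_order := by
  intro r m _
  unfold Spec_get_vectors_order get_vectors_order get_vectors_order_alt
  dsimp only
  apply PySem.List.foldl_congr_mem
  intro acc i _
  simp only [PySem.List.foldl_append_singleton_eq_self]
  rw [pv_sorted_rev _ (PySem.List.pairwise_lt_pyRange_one 0 m), pv_rev_eq]
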